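-- pv_equiv track=rewrite | github.com/Speeditidious/OJIK-BMS | api/app/services/ranking_calculator.py | _partial_sha256_match
-- ===== SOURCE A (Python) =====
-- def _partial_sha256_match(stored: str, sha_list: list[str | None]) -> bool:
--     """Check Beatoraja fumen_hash_others against a partially-known sha256 list.
--
--     sha_list contains sha256 values for each course member in order.
--     None positions are treated as wildcards (any 64-char hex accepted).
--     stored must be exactly 64 * len(sha_list) characters long.
--     """
--     if len(stored) != 64 * len(sha_list):
--         return False
--     for i, sha in enumerate(sha_list):
--         if sha is None:
--             continue
--         if stored[i * 64 : (i + 1) * 64] != sha: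
--             return False
--     return True
-- ===== SOURCE B (Python) =====
-- def _partial_sha256_match(stored: str, sha_list: list[str | None]) -> bool:
--     # Consume the stored string 64 chars at a time instead of indexing slices
--     # against a precomputed total-length check.
--     rest = stored
--     for sha in sha_list:
--         chunk, rest = rest[:64], rest[64:]
--         if len(chunk) != 64:
--             return False
--         if sha is not None and chunk != sha:
--             return False
--     return rest == ""
-- ===== Notes on version B (the rewrite author's own statement) =====
-- stated objective: simpler
-- what changed: Replaces the upfront total-length check plus index-arithmetic slice comparisons with a single pass that consumes the string 64 characters at a time, checking each chunk's length and value as it goes and requiring an empty remainder at the end.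
import Mathlib
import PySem

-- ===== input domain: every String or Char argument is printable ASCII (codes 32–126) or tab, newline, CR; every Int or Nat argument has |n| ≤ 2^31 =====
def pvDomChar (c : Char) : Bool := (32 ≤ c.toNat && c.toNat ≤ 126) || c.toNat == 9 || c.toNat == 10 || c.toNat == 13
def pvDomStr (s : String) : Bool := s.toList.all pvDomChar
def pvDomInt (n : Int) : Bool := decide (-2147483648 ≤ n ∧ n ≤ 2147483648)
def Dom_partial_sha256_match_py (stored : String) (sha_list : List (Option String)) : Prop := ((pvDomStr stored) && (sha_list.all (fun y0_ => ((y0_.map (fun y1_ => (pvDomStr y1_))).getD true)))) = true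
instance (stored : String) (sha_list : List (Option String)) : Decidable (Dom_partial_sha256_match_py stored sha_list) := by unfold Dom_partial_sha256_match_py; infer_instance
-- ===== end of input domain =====

-- B replaces A's upfront total-length check plus index-arithmetic slice comparisons
-- with a single pass that consumes the string 64 characters at a time (simpler, same cost).


-- ===== PORT A =====
-- the 'for i, sha in enumerate(sha_list)' loop with early 'return False'
def pyLoopA (s : List Char) : List (Int × Option String) → Bool
  | [] => true
  | (_, none) :: rest => pyLoopA s rest          -- 'if sha is None: continue'
  | (i, some t) :: rest =>
    if PySem.List.slice s (some (i * 64)) (some ((i + 1) * 64)) ≠ t.toList then false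
    else pyLoopA s rest

def partial_sha256_match_py (stored : String) (sha_list : List (Option String)) : Bool :=
  if stored.toList.length ≠ 64 * sha_list.length then false
  else pyLoopA stored.toList (PySem.List.enumerate sha_list)

-- ===== PORT B =====
-- B's loop: peel 64 chars off the front per list entry, remainder must be empty
def altGo : List (Option String) → List Char → Bool
  | [], rest => rest.isEmpty
  | none :: shas, rest =>                        -- 'sha is not None and …' short-circuits
    if (rest.take 64).length ≠ 64 then false
    else altGo shas (rest.drop 64)
  | some t :: shas, rest =>
    if (rest.take 64).length ≠ 64 then false
    else if rest.take 64 ≠ t.toList then false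
    else altGo shas (rest.drop 64)

def partial_sha256_match_py_alt (stored : String) (sha_list : List (Option String)) : Bool :=
  altGo sha_list stored.toList

-- ===== PRECONDITION & SPEC =====
def Spec_partial_sha256_match_py (stored : String) (sha_list : List (Option String)) (out : Bool) : Prop := out = partial_sha256_match_py_alt stored sha_list
instance (stored : String) (sha_list : List (Option String)) (out : Bool) : Decidable (Spec_partial_sha256_match_py stored sha_list out) := by unfold Spec_partial_sha256_match_py; infer_instance

-- ===== CLAIM (what is proved, stated in full; the proofs are below) =====
def Claim_equal_partial_sha256_match_py : Prop := ∀ (stored : String) (sha_list : List (Option String)), Dom_partial_sha256_match_py stored sha_list → Spec_partial_sha256_match_py stored sha_list (partial_sha256_match_py stored sha_list)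

-- ===== LEMMAS AND PROOFS =====

-- if the remaining string does not have exactly 64 chars per remaining entry, B's loop fails
lemma altGo_false_of_len (shas : List (Option String)) :
    ∀ rest : List Char, rest.length ≠ 64 * shas.length → altGo shas rest = false := by
  induction shas with
  | nil =>
    intro rest h
    simp only [altGo, List.isEmpty_eq_false_iff, ne_eq]
    intro he; exact h (by simp [he])
  | cons sha shas ih =>
    intro rest h
    by_cases hlen : (rest.take 64).length = 64
    · have h64 : 64 ≤ rest.length := by
        simp only [List.length_take] at hlen; omega
      have hrec : (rest.drop 64).length ≠ 64 * shas.length := by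
        simp only [List.length_drop]
        simp only [List.length_cons] at h; omega
      rcases sha with _ | t
      · simp only [altGo]
        rw [if_neg (by simpa using hlen)]
        exact ih _ hrec
      · simp only [altGo]
        rw [if_neg (by simpa using hlen)]
        by_cases hc : rest.take 64 = t.toList
        · rw [if_neg (by simp [hc])]; exact ih _ hrec
        · rw [if_pos hc]
    · rcases sha with _ | t
      · simp only [altGo]; rw [if_pos hlen]
      · simp only [altGo]; rw [if_pos hlen]

-- A's enumerated loop (with the total length known) equals B's consuming loop
lemma loop_eq (shas : List (Option String)) :
    ∀ (k : ℕ) (s : List Char), s.length = 64 * (k + shas.length) →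
      pyLoopA s (PySem.List.enumerate shas (k : Int)) = altGo shas (s.drop (64 * k)) := by
  induction shas with
  | nil =>
    intro k s hs
    have : s.drop (64 * k) = [] := by
      apply List.eq_nil_of_length_eq_zero
      simp [List.length_drop, hs]
    simp [PySem.List.enumerate_nil, pyLoopA, altGo, this]
  | cons sha shas ih =>
    intro k s hs
    have hrest : 64 * (k + 1) ≤ s.length := by rw [hs, List.length_cons]; omega
    have hlen : ((s.drop (64 * k)).take 64).length = 64 := by
      simp only [List.length_take, List.length_drop]; omega
    have hdd : (s.drop (64 * k)).drop 64 = s.drop (64 * (k + 1)) := by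
      rw [List.drop_drop]; ring_nf
    have hslice : PySem.List.slice s (some ((k : Int) * 64)) (some (((k : Int) + 1) * 64))
        = (s.drop (64 * k)).take 64 := by
      have h1 : ((k : Int) * 64) = ((64 * k : ℕ) : Int) := by push_cast; ring
      have h2 : (((k : Int) + 1) * 64) = ((64 * k + 64 : ℕ) : Int) := by push_cast; ring
      rw [h1, h2, PySem.List.slice_natCast]
      congr 1; omega
    have hnext : s.length = 64 * ((k + 1) + shas.length) := by
      rw [hs, List.length_cons]; ring
    have ihk := ih (k + 1) s hnext
    push_cast at ihk
    rw [PySem.List.enumerate_cons]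
    rcases sha with _ | t
    · simp only [pyLoopA, altGo]
      rw [if_neg (by simpa using hlen), hdd]
      exact ihk
    · simp only [pyLoopA, altGo]
      rw [hslice, hdd,
        if_neg (show ¬((s.drop (64 * k)).take 64).length ≠ 64 from not_not_intro hlen)]
      by_cases hc : (s.drop (64 * k)).take 64 = t.toList
      · rw [if_neg (not_not_intro hc), if_neg (not_not_intro hc)]
        exact ihk
      · rw [if_pos hc, if_pos hc]

-- ===== VERDICT (by name: the statement is the Claim_ definition above) =====
theorem partial_sha256_match_py_spec : Claim_equal_partial_sha256_match_py := by
  intro stored sha_list _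
  unfold Spec_partial_sha256_match_py partial_sha256_match_py partial_sha256_match_py_alt
  by_cases h : stored.toList.length = 64 * sha_list.length
  · rw [if_neg (fun hc => hc h)]
    have := loop_eq sha_list 0 stored.toList (by simpa using h)
    simpa using this
  · rw [if_pos h]
    exact (altGo_false_of_len sha_list stored.toList h).symm
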